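-- pv_equiv track=rewrite | github.com/mstan/snesrecomp | fuzz/build_opcode_table.py | mnem_flags
-- ===== SOURCE A (Python) =====
-- FLAGS_N_Z = {'LDA','LDX','LDY','TAX','TAY','TXA','TYA','TXY','TYX','TSX',
--              'INX','INY','DEX','DEY','INC','DEC','AND','ORA','EOR',
--              'ASL','LSR','ROL','ROR','BIT','PLA','PLX','PLY','XBA','TCD','TDC',
--              'TSB','TRB'}  # Z only for TSB/TRB
--
-- FLAGS_C    = {'ADC','SBC','CMP','CPX','CPY','ASL','LSR','ROL','ROR',
--               'CLC','SEC','XCE'}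
--
-- FLAGS_V    = {'ADC','SBC','BIT','CLV'}
--
-- FLAGS_D    = {'CLD','SED'}
--
-- FLAGS_I    = {'CLI','SEI'}
--
-- FLAGS_M_X  = {'REP','SEP','PLP','XCE'}  # REP/SEP modify M/X directly
--
-- def mnem_flags(mnem: str) -> list[str]:
--     out = []
--     if mnem in FLAGS_N_Z: out += ['N','Z']
--     if mnem in FLAGS_C:   out.append('C')
--     if mnem in FLAGS_V:   out.append('V')
--     if mnem in FLAGS_D:   out.append('D')
--     if mnem in FLAGS_I:   out.append('I')
--     if mnem in FLAGS_M_X: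
--         out += ['M','X']
--     # CMP/CPX/CPY also set N and Z
--     if mnem in ('CMP','CPX','CPY') and 'N' not in out:
--         out += ['N','Z']
--     # ADC/SBC set N/Z/C/V
--     if mnem in ('ADC','SBC'):
--         for f in ('N','Z'):
--             if f not in out: out.append(f)
--     # PLP/RTI restore all flags
--     if mnem in ('PLP','RTI'):
--         out = ['N','V','M','X','D','I','Z','C']
--     return sorted(set(out))
-- ===== SOURCE B (Python) =====
-- # One inverted table: mnemonic -> its exact affected-flag list (already sorted); lookup with default [].
-- FLAG_TABLE = {
--     'LDA': ['N', 'Z'], 'LDX': ['N', 'Z'], 'LDY': ['N', 'Z'],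
--     'TAX': ['N', 'Z'], 'TAY': ['N', 'Z'], 'TXA': ['N', 'Z'], 'TYA': ['N', 'Z'],
--     'TXY': ['N', 'Z'], 'TYX': ['N', 'Z'], 'TSX': ['N', 'Z'],
--     'INX': ['N', 'Z'], 'INY': ['N', 'Z'], 'DEX': ['N', 'Z'], 'DEY': ['N', 'Z'],
--     'INC': ['N', 'Z'], 'DEC': ['N', 'Z'],
--     'AND': ['N', 'Z'], 'ORA': ['N', 'Z'], 'EOR': ['N', 'Z'],
--     'PLA': ['N', 'Z'], 'PLX': ['N', 'Z'], 'PLY': ['N', 'Z'],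
--     'XBA': ['N', 'Z'], 'TCD': ['N', 'Z'], 'TDC': ['N', 'Z'],
--     'TSB': ['N', 'Z'], 'TRB': ['N', 'Z'],
--     'ASL': ['C', 'N', 'Z'], 'LSR': ['C', 'N', 'Z'],
--     'ROL': ['C', 'N', 'Z'], 'ROR': ['C', 'N', 'Z'],
--     'CMP': ['C', 'N', 'Z'], 'CPX': ['C', 'N', 'Z'], 'CPY': ['C', 'N', 'Z'],
--     'ADC': ['C', 'N', 'V', 'Z'], 'SBC': ['C', 'N', 'V', 'Z'],
--     'BIT': ['N', 'V', 'Z'],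
--     'CLC': ['C'], 'SEC': ['C'],
--     'CLV': ['V'],
--     'CLD': ['D'], 'SED': ['D'],
--     'CLI': ['I'], 'SEI': ['I'],
--     'REP': ['M', 'X'], 'SEP': ['M', 'X'],
--     'XCE': ['C', 'M', 'X'],
--     'PLP': ['C', 'D', 'I', 'M', 'N', 'V', 'X', 'Z'],
--     'RTI': ['C', 'D', 'I', 'M', 'N', 'V', 'X', 'Z'],
-- }
--
-- def mnem_flags(mnem: str) -> list[str]:
--     return FLAG_TABLE.get(mnem, [])
-- ===== Notes on version B (the rewrite author's own statement) =====
-- stated objective: simpler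
-- what changed: Replaced the six per-flag membership sets plus sequential append/fix-up branches and a final sorted(set(...)) with a single inverted dict mapping each mnemonic to its exact sorted flag list, so the body is one lookup with default [].
import Mathlib
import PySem

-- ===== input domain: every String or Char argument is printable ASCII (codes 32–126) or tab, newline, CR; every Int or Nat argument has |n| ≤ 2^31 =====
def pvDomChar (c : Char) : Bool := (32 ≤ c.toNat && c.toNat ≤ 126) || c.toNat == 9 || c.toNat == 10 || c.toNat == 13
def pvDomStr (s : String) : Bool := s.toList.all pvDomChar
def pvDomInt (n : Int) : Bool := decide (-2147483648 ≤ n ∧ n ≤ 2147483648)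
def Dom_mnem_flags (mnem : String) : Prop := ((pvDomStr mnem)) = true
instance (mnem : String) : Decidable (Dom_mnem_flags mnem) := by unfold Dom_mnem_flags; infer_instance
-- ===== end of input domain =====

-- B replaces A's per-flag sets and fix-up branches with one inverted mnemonic->flags table (objective: simpler).

-- ===== PORT A =====
def FLAGS_N_Z : List String := ["LDA","LDX","LDY","TAX","TAY","TXA","TYA","TXY","TYX","TSX",
  "INX","INY","DEX","DEY","INC","DEC","AND","ORA","EOR",
  "ASL","LSR","ROL","ROR","BIT","PLA","PLX","PLY","XBA","TCD","TDC","TSB","TRB"]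
def FLAGS_C : List String := ["ADC","SBC","CMP","CPX","CPY","ASL","LSR","ROL","ROR","CLC","SEC","XCE"]
def FLAGS_V : List String := ["ADC","SBC","BIT","CLV"]
def FLAGS_D : List String := ["CLD","SED"]
def FLAGS_I : List String := ["CLI","SEI"]
def FLAGS_M_X : List String := ["REP","SEP","PLP","XCE"]

def mnem_flags (mnem : String) : List String :=
  let out : List String := []
  let out := if mnem ∈ FLAGS_N_Z then out ++ ["N","Z"] else out
  let out := if mnem ∈ FLAGS_C then out ++ ["C"] else out
  let out := if mnem ∈ FLAGS_V then out ++ ["V"] else out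
  let out := if mnem ∈ FLAGS_D then out ++ ["D"] else out
  let out := if mnem ∈ FLAGS_I then out ++ ["I"] else out
  let out := if mnem ∈ FLAGS_M_X then out ++ ["M","X"] else out
  let out := if mnem ∈ (["CMP","CPX","CPY"] : List String) ∧ "N" ∉ out then out ++ ["N","Z"] else out
  let out := if mnem ∈ (["ADC","SBC"] : List String) then
      (["N","Z"] : List String).foldl (fun o f => if f ∈ o then o else o ++ [f]) out
    else out
  let out := if mnem ∈ (["PLP","RTI"] : List String) then ["N","V","M","X","D","I","Z","C"] else out
  -- sorted(set(out)); key (·.toList) = code-point order, identical to Python's str '<' (PySem: String '<' IS '<' on toList)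
  PySem.List.sorted (PySem.Set.ofList out) (fun x => x.toList) false

-- ===== PORT B =====
def FLAG_TABLE : PySem.Dict String (List String) :=
  PySem.Dict.ofList [("LDA", ["N", "Z"]),
   ("LDX", ["N", "Z"]),
   ("LDY", ["N", "Z"]),
   ("TAX", ["N", "Z"]),
   ("TAY", ["N", "Z"]),
   ("TXA", ["N", "Z"]),
   ("TYA", ["N", "Z"]),
   ("TXY", ["N", "Z"]),
   ("TYX", ["N", "Z"]),
   ("TSX", ["N", "Z"]),
   ("INX", ["N", "Z"]),
   ("INY", ["N", "Z"]),
   ("DEX", ["N", "Z"]),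
   ("DEY", ["N", "Z"]),
   ("INC", ["N", "Z"]),
   ("DEC", ["N", "Z"]),
   ("AND", ["N", "Z"]),
   ("ORA", ["N", "Z"]),
   ("EOR", ["N", "Z"]),
   ("PLA", ["N", "Z"]),
   ("PLX", ["N", "Z"]),
   ("PLY", ["N", "Z"]),
   ("XBA", ["N", "Z"]),
   ("TCD", ["N", "Z"]),
   ("TDC", ["N", "Z"]),
   ("TSB", ["N", "Z"]),
   ("TRB", ["N", "Z"]),
   ("ASL", ["C", "N", "Z"]),
   ("LSR", ["C", "N", "Z"]),
   ("ROL", ["C", "N", "Z"]),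
   ("ROR", ["C", "N", "Z"]),
   ("CMP", ["C", "N", "Z"]),
   ("CPX", ["C", "N", "Z"]),
   ("CPY", ["C", "N", "Z"]),
   ("ADC", ["C", "N", "V", "Z"]),
   ("SBC", ["C", "N", "V", "Z"]),
   ("BIT", ["N", "V", "Z"]),
   ("CLC", ["C"]),
   ("SEC", ["C"]),
   ("CLV", ["V"]),
   ("CLD", ["D"]),
   ("SED", ["D"]),
   ("CLI", ["I"]),
   ("SEI", ["I"]),
   ("REP", ["M", "X"]),
   ("SEP", ["M", "X"]),
   ("XCE", ["C", "M", "X"]),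
   ("PLP", ["C", "D", "I", "M", "N", "V", "X", "Z"]),
   ("RTI", ["C", "D", "I", "M", "N", "V", "X", "Z"])]

def mnem_flags_alt (mnem : String) : List String :=
  FLAG_TABLE.getD mnem []

-- ===== PRECONDITION & SPEC =====
def Spec_mnem_flags (mnem : String) (out : List String) : Prop := out = mnem_flags_alt mnem
instance (mnem : String) (out : List String) : Decidable (Spec_mnem_flags mnem out) := by unfold Spec_mnem_flags; infer_instance

-- ===== CLAIM (what is proved, stated in full; the proofs are below) =====
def Claim_equal_mnem_flags : Prop := ∀ (mnem : String), Dom_mnem_flags mnem → Spec_mnem_flags mnem (mnem_flags mnem)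

-- ===== LEMMAS AND PROOFS =====

-- every mnemonic mentioned by either program
def pvUniv : List String := ["ADC", "AND", "ASL", "BIT", "CLC", "CLD", "CLI", "CLV", "CMP", "CPX", "CPY", "DEC", "DEX", "DEY", "EOR", "INC", "INX", "INY", "LDA", "LDX", "LDY", "LSR", "ORA", "PLA", "PLP", "PLX", "PLY", "REP", "ROL", "ROR", "RTI", "SBC", "SEC", "SED", "SEI", "SEP", "TAX", "TAY", "TCD", "TDC", "TRB", "TSB", "TSX", "TXA", "TXY", "TYA", "TYX", "XBA", "XCE"]

set_option maxRecDepth 8192 in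
theorem pv_eq_of_mem (mnem : String) (h : mnem ∈ pvUniv) :
    mnem_flags mnem = mnem_flags_alt mnem := by
  fin_cases h <;> decide

theorem pv_eq_of_not_mem (mnem : String) (h : mnem ∉ pvUniv) :
    mnem_flags mnem = mnem_flags_alt mnem := by
  simp only [pvUniv, List.mem_cons, List.not_mem_nil, or_false] at h
  push_neg at h
  have hk : mnem ∉ FLAG_TABLE.keys := by
    rw [show FLAG_TABLE.keys = ["LDA", "LDX", "LDY", "TAX", "TAY", "TXA", "TYA", "TXY", "TYX", "TSX", "INX", "INY", "DEX", "DEY", "INC", "DEC", "AND", "ORA", "EOR", "PLA", "PLX", "PLY", "XBA", "TCD", "TDC", "TSB", "TRB", "ASL", "LSR", "ROL", "ROR", "CMP", "CPX", "CPY", "ADC", "SBC", "BIT", "CLC", "SEC", "CLV", "CLD", "SED", "CLI", "SEI", "REP", "SEP", "XCE", "PLP", "RTI"] from by set_option maxRecDepth 8192 in decide]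
    simp [h]
  have hc : FLAG_TABLE.contains mnem = false := by
    rw [PySem.Dict.contains_eq_decide_mem_keys]; simp [hk]
  show mnem_flags mnem = FLAG_TABLE.getD mnem []
  rw [PySem.Dict.getD_of_not_contains FLAG_TABLE [] hc]
  simp [mnem_flags, FLAGS_N_Z, FLAGS_C, FLAGS_V, FLAGS_D, FLAGS_I, FLAGS_M_X,
        PySem.List.sorted, PySem.Set.ofList, h]

-- ===== VERDICT (by name: the statement is the Claim_ definition above) =====
theorem mnem_flags_spec : Claim_equal_mnem_flags := by
  intro mnem _
  unfold Spec_mnem_flags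
  by_cases h : mnem ∈ pvUniv
  · exact pv_eq_of_mem mnem h
  · exact pv_eq_of_not_mem mnem h
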